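-- pv_equiv track=rewrite | github.com/aviadkim/findoc-analyzer | backv2-github/DevDocs/backend/enhanced_processing/advanced_image_processor.py | _group_lines_by_position
-- ===== SOURCE A (Python) =====
-- from typing import List, Dict, Any, Tuple, Optional
--
-- def _group_lines_by_position(lines: List[Tuple[int, int, int, int]], axis: int) -> List[List[Tuple[int, int, int, int]]]:
--     """
--     Group lines by their position.
--
--     Args:
--         lines: List of lines
--         axis: Axis to group by (0 for x, 1 for y)
--
--     Returns:
--         List of line groups
--     """
--     if not lines:
--         return []
--
--     # Sort lines by the specified axis
--     sorted_lines = sorted(lines, key=lambda x: x[axis])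
--
--     groups = []
--     current_group = [sorted_lines[0]]
--
--     for i in range(1, len(sorted_lines)):
--         current_line = sorted_lines[i]
--         prev_line = current_group[-1]
--
--         # Check if current line is close to previous line
--         if abs(current_line[axis] - prev_line[axis]) <= 10:
--             current_group.append(current_line)
--         else:
--             # Start a new group
--             groups.append(current_group)
--             current_group = [current_line]
--
--     # Add the last group
--     if current_group:
--         groups.append(current_group)
--
--     return groups
-- ===== SOURCE B (Python) =====
-- from typing import List, Tuple
--
-- def _group_lines_by_position(lines: List[Tuple[int, int, int, int]], axis: int) -> List[List[Tuple[int, int, int, int]]]: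
--     """Two-phase decomposition: find the break indices first, then slice the
--     sorted list into contiguous groups at those boundaries."""
--     if not lines:
--         return []
--     s = sorted(lines, key=lambda x: x[axis])
--     n = len(s)
--     cuts = [i for i in range(1, n) if abs(s[i][axis] - s[i - 1][axis]) > 10]
--     bounds = [0] + cuts + [n]
--     return [s[a:b] for a, b in zip(bounds, bounds[1:])]
-- ===== Notes on version B (the rewrite author's own statement) =====
-- stated objective: alternative
-- what changed: Replaces the incremental accumulate-and-flush group loop with a two-phase decomposition: one pass computes the break indices between adjacent sorted lines, then the sorted list is sliced into contiguous groups at those boundaries.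
import Mathlib
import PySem

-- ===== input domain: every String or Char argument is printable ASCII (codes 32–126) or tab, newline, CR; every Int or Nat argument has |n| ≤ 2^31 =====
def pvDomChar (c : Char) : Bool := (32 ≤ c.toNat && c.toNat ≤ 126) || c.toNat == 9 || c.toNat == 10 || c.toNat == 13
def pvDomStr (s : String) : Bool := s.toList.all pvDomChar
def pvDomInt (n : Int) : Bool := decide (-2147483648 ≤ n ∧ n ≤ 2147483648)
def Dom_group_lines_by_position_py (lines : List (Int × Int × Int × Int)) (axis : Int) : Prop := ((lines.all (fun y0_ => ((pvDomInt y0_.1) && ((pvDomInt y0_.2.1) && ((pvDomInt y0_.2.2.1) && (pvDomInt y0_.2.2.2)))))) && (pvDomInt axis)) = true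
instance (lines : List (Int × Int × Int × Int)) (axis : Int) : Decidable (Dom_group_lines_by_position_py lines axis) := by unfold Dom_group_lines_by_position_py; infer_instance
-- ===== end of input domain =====

-- B replaces A's accumulate-and-flush loop by a two-phase break-indices-then-slice decomposition (alternative, same cost).

-- shared helper: Python's x[axis] on a 4-tuple (negative indices wrap; other axes raise IndexError and are excluded by Pre_)
def pvAxisVal (t : Int × Int × Int × Int) (axis : Int) : Int :=
  if axis = 0 ∨ axis = -4 then t.1
  else if axis = 1 ∨ axis = -3 then t.2.1
  else if axis = 2 ∨ axis = -2 then t.2.2.1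
  else t.2.2.2

-- ===== PORT A =====
def group_lines_by_position_py (lines : List (Int × Int × Int × Int)) (axis : Int) : List (List (Int × Int × Int × Int)) :=
  if lines = [] then []
  else
    let sorted_lines := PySem.List.sorted lines (fun x => pvAxisVal x axis)
    let st := (PySem.List.pyRange 1 (sorted_lines.length : Int) 1).foldl
      (fun (st : List (List (Int × Int × Int × Int)) × List (Int × Int × Int × Int)) i =>
        let current_line := PySem.List.pyGetD sorted_lines i (0, 0, 0, 0)
        let prev_line := PySem.List.pyGetD st.2 (-1) (0, 0, 0, 0)  -- current_group[-1]; current_group is never empty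
        if |pvAxisVal current_line axis - pvAxisVal prev_line axis| ≤ 10
        then (st.1, st.2 ++ [current_line])
        else (st.1 ++ [st.2], [current_line]))
      ([], [PySem.List.pyGetD sorted_lines 0 (0, 0, 0, 0)])
    if st.2 ≠ [] then st.1 ++ [st.2] else st.1

-- ===== PORT B =====
def group_lines_by_position_py_alt (lines : List (Int × Int × Int × Int)) (axis : Int) : List (List (Int × Int × Int × Int)) :=
  if lines = [] then []
  else
    let s := PySem.List.sorted lines (fun x => pvAxisVal x axis)
    let n : Int := (s.length : Int)
    let cuts := (PySem.List.pyRange 1 n 1).filter (fun i =>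
      10 < |pvAxisVal (PySem.List.pyGetD s i (0, 0, 0, 0)) axis - pvAxisVal (PySem.List.pyGetD s (i - 1) (0, 0, 0, 0)) axis|)
    let bounds := 0 :: (cuts ++ [n])
    (bounds.zip bounds.tail).map (fun ab => PySem.List.slice s (some ab.1) (some ab.2))

-- ===== PRECONDITION & SPEC =====
-- Pre_ excludes only inputs where A raises: a nonempty list with axis outside [-4, 3] makes x[axis] raise IndexError.
def Pre_group_lines_by_position_py (lines : List (Int × Int × Int × Int)) (axis : Int) : Prop :=
  lines = [] ∨ (-4 ≤ axis ∧ axis < 4)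
instance (lines : List (Int × Int × Int × Int)) (axis : Int) : Decidable (Pre_group_lines_by_position_py lines axis) := by unfold Pre_group_lines_by_position_py; infer_instance
def pvWitness_group_lines_by_position_py : (List (Int × Int × Int × Int)) × Int := ([(0, 1, 2, 3), (25, 4, 5, 6), (7, 8, 9, 10)], 0)

def Spec_group_lines_by_position_py (lines : List (Int × Int × Int × Int)) (axis : Int) (out : List (List (Int × Int × Int × Int))) : Prop := out = group_lines_by_position_py_alt lines axis
instance (lines : List (Int × Int × Int × Int)) (axis : Int) (out : List (List (Int × Int × Int × Int))) : Decidable (Spec_group_lines_by_position_py lines axis out) := by unfold Spec_group_lines_by_position_py; infer_instance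

-- ===== CLAIM (what is proved, stated in full; the proofs are below) =====
def Claim_equal_group_lines_by_position_py : Prop := ∀ (lines : List (Int × Int × Int × Int)) (axis : Int), Dom_group_lines_by_position_py lines axis → Pre_group_lines_by_position_py lines axis → Spec_group_lines_by_position_py lines axis (group_lines_by_position_py lines axis)

-- ===== LEMMAS AND PROOFS =====

def pvChunk (f : (Int × Int × Int × Int) → Int) (x : Int × Int × Int × Int) :
    List (Int × Int × Int × Int) → List (Int × Int × Int × Int) × List (List (Int × Int × Int × Int))
  | [] => ([], [])
  | y :: t =>
    let p := pvChunk f y t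
    if |f y - f x| ≤ 10 then (y :: p.1, p.2) else ([], (y :: p.1) :: p.2)

theorem pvChunk_A (f : (Int × Int × Int × Int) → Int) (rest : List (Int × Int × Int × Int)) :
    ∀ (groups : List (List (Int × Int × Int × Int))) (cur : List (Int × Int × Int × Int)) (x : Int × Int × Int × Int),
    (let st := rest.foldl
      (fun (st : List (List (Int × Int × Int × Int)) × List (Int × Int × Int × Int)) c =>
        if |f c - f (PySem.List.pyGetD st.2 (-1) (0, 0, 0, 0))| ≤ 10
        then (st.1, st.2 ++ [c])
        else (st.1 ++ [st.2], [c])) (groups, cur ++ [x])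
     if st.2 ≠ [] then st.1 ++ [st.2] else st.1)
    = groups ++ (cur ++ x :: (pvChunk f x rest).1) :: (pvChunk f x rest).2 := by
  induction rest with
  | nil => intro groups cur x; simp [pvChunk]
  | cons y t ih =>
    intro groups cur x
    simp only [List.foldl_cons, PySem.List.pyGetD_neg_one_append_singleton, pvChunk]
    by_cases h : |f y - f x| ≤ 10
    · simpa [h, List.append_assoc] using ih groups (cur ++ [x]) y
    · simpa [h, List.append_assoc] using ih (groups ++ [cur ++ [x]]) [] y

theorem pv_slice_cons (s : List (Int × Int × Int × Int)) (a : Nat) (x : Int × Int × Int × Int)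
    (r : List (Int × Int × Int × Int)) (h : s.drop a = x :: r) (c0 : Int) (hc : (a : Int) + 1 ≤ c0) :
    PySem.List.slice s (some (a : Int)) (some c0) = x :: PySem.List.slice s (some ((a : Int) + 1)) (some c0) := by
  have h1 : s.drop (a + 1) = r := by
    have := congrArg (List.drop 1) h
    simpa [List.drop_drop, Nat.add_comm] using this
  rw [show ((a : Int) + 1) = ((a + 1 : Nat) : Int) by push_cast; ring,
      show c0 = ((c0.toNat : Nat) : Int) by omega,
      PySem.List.slice_natCast, PySem.List.slice_natCast, h, h1]
  rw [show c0.toNat - a = (c0.toNat - (a + 1)) + 1 by omega]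
  simp

theorem pvChunk_B (f : (Int × Int × Int × Int) → Int) (s : List (Int × Int × Int × Int)) :
    ∀ (r : List (Int × Int × Int × Int)) (a : Nat) (x : Int × Int × Int × Int),
    s.drop a = x :: r →
    (((a : Int) :: (((PySem.List.pyRange ((a : Int) + 1) (s.length : Int) 1).filter (fun i =>
        10 < |f (PySem.List.pyGetD s i (0, 0, 0, 0)) - f (PySem.List.pyGetD s (i - 1) (0, 0, 0, 0))|)) ++ [(s.length : Int)])).zip
      (((PySem.List.pyRange ((a : Int) + 1) (s.length : Int) 1).filter (fun i =>
        10 < |f (PySem.List.pyGetD s i (0, 0, 0, 0)) - f (PySem.List.pyGetD s (i - 1) (0, 0, 0, 0))|)) ++ [(s.length : Int)])).map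
      (fun ab => PySem.List.slice s (some ab.1) (some ab.2))
    = (x :: (pvChunk f x r).1) :: (pvChunk f x r).2 := by
  intro r
  induction r with
  | nil =>
    intro a x h
    have hlen : s.length = a + 1 := by
      have := congrArg List.length h; simp at this; omega
    have hr : PySem.List.pyRange ((a : Int) + 1) (s.length : Int) 1 = [] := by
      apply PySem.List.pyRange_one_eq_nil; omega
    rw [hr]
    simp only [List.filter_nil, List.nil_append, List.zip_cons_cons, List.zip_nil_right, List.map_cons, List.map_nil]
    rw [show ((s.length : Int)) = ((s.length : Nat) : Int) by rfl, PySem.List.slice_natCast, h, hlen]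
    simp [pvChunk]
  | cons y t ih =>
    intro a x h
    have h1 : s.drop (a + 1) = y :: t := by
      have := congrArg (List.drop 1) h
      simpa [List.drop_drop, Nat.add_comm] using this
    have hlen : a + 1 < s.length := by
      have := congrArg List.length h1; simp at this; omega
    have hx : s[a]? = some x := by
      have := congrArg (fun l => l[0]?) h; simpa [List.getElem?_drop] using this
    have hy : s[a+1]? = some y := by
      have := congrArg (fun l => l[0]?) h1; simpa [List.getElem?_drop] using this
    have hgx : PySem.List.pyGetD s ((a : Int)) (0,0,0,0) = x := by
      rw [PySem.List.pyGetD_natCast]; simp [List.getD, hx]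
    have hgy : PySem.List.pyGetD s ((a : Int) + 1) (0,0,0,0) = y := by
      rw [show ((a : Int) + 1) = ((a + 1 : Nat) : Int) by push_cast; ring, PySem.List.pyGetD_natCast]
      simp [List.getD, hy]
    have hrange : PySem.List.pyRange ((a : Int) + 1) (s.length : Int) 1
        = ((a : Int) + 1) :: PySem.List.pyRange ((a : Int) + 1 + 1) (s.length : Int) 1 := by
      apply PySem.List.pyRange_one_cons; omega
    have ihy := ih (a + 1) y h1
    push_cast at ihy
    rw [hrange]
    simp only [List.filter_cons]
    have hsimp : ((a : Int) + 1 - 1) = (a : Int) := by ring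
    set C := (PySem.List.pyRange ((a : Int) + 1 + 1) (s.length : Int) 1).filter (fun i =>
      decide (10 < |f (PySem.List.pyGetD s i (0, 0, 0, 0)) - f (PySem.List.pyGetD s (i - 1) (0, 0, 0, 0))|)) with hC
    by_cases hgap : |f y - f x| ≤ 10
    · have hcond : (decide (10 < |f (PySem.List.pyGetD s ((a:Int)+1) (0,0,0,0)) - f (PySem.List.pyGetD s ((a:Int)+1-1) (0,0,0,0))|)) = false := by
        rw [hgy, hsimp, hgx]; simp; omega
      rw [hcond]
      simp only [Bool.false_eq_true, if_false]
      obtain ⟨c0, l', hl⟩ : ∃ c0 l', C ++ [(s.length : Int)] = c0 :: l' := by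
        cases hCc : C ++ [(s.length : Int)] with
        | nil => simp at hCc
        | cons c0 l' => exact ⟨c0, l', rfl⟩
      have hc0 : (a : Int) + 1 ≤ c0 := by
        have hm : c0 ∈ C ++ [(s.length : Int)] := by rw [hl]; simp
        rcases List.mem_append.mp hm with hm | hm
        · rw [hC] at hm
          have := (PySem.List.mem_pyRange_one.mp (List.mem_of_mem_filter hm)).1
          omega
        · simp at hm; omega
      rw [hl] at ihy ⊢
      simp only [List.zip_cons_cons, List.map_cons] at ihy ⊢
      injection ihy with hhead htail
      rw [pv_slice_cons s a x (y :: t) h c0 hc0, hhead, htail]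
      simp [pvChunk, hgap]
    · have hcond : (decide (10 < |f (PySem.List.pyGetD s ((a:Int)+1) (0,0,0,0)) - f (PySem.List.pyGetD s ((a:Int)+1-1) (0,0,0,0))|)) = true := by
        rw [hgy, hsimp, hgx]; simp; omega
      rw [hcond]
      simp only [if_true, List.cons_append, List.zip_cons_cons, List.map_cons]
      rw [ihy]
      have hslice : PySem.List.slice s (some (a : Int)) (some ((a : Int) + 1)) = [x] := by
        rw [show ((a : Int) + 1) = ((a + 1 : Nat) : Int) by push_cast; ring,
            PySem.List.slice_natCast, h]
        simp
      rw [hslice]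
      simp [pvChunk, hgap]


theorem group_lines_by_position_py_main (lines : List (Int × Int × Int × Int)) (axis : Int) :
    group_lines_by_position_py lines axis = group_lines_by_position_py_alt lines axis := by
  unfold group_lines_by_position_py group_lines_by_position_py_alt
  by_cases hl : lines = []
  · simp [hl]
  simp only [if_neg hl]
  set s := PySem.List.sorted lines (fun x => pvAxisVal x axis) with hsdef
  have hs : s ≠ [] := by
    rw [hsdef, Ne, PySem.List.sorted_eq_nil_iff]; exact hl
  obtain ⟨x, r, hxr⟩ := List.exists_cons_of_ne_nil hs
  have hA := PySem.List.foldl_pyRange_pyGetD' s (0, 0, 0, 0)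
    (fun (st : List (List (Int × Int × Int × Int)) × List (Int × Int × Int × Int)) c =>
      if |pvAxisVal c axis - pvAxisVal (PySem.List.pyGetD st.2 (-1) (0, 0, 0, 0)) axis| ≤ 10
      then (st.1, st.2 ++ [c])
      else (st.1 ++ [st.2], [c]))
    ([], [PySem.List.pyGetD s 0 (0, 0, 0, 0)]) (a := 1) (by norm_num)
  rw [hA]
  have hB := pvChunk_B (fun t => pvAxisVal t axis) s r 0 x (by simpa using hxr)
  push_cast at hB
  simp only [List.tail_cons]
  rw [hB]
  have hA2 := pvChunk_A (fun t => pvAxisVal t axis) r [] [] x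
  simp only [List.nil_append] at hA2
  rw [hxr]
  simp only [Int.toNat_one, List.drop_succ_cons, PySem.List.pyGetD_zero_cons]
  exact hA2

-- ===== VERDICT (by name: the statement is the Claim_ definition above) =====
theorem group_lines_by_position_py_spec : Claim_equal_group_lines_by_position_py := by
  intro lines axis _ _
  unfold Spec_group_lines_by_position_py
  exact group_lines_by_position_py_main lines axis
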